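-- pv_equiv track=rewrite | github.com/paveleroshkinweb/algorithms | algorithms/src/problems/sheeps.py | sort_sheeps_min
-- ===== SOURCE A (Python) =====
-- def get_shifts(sheep_row):
--     sheep_count = 0
--     last_sheep_position = None
--     shifts = []
--     for idx in range(len(sheep_row)-1, -1, -1):
--         if sheep_row[idx] == '*':
--             if sheep_count > 0:
--                 diff = last_sheep_position - idx - 1
--                 shift = diff * sheep_count + shifts[-1]
--                 shifts.append(shift)
--             else:
--                 shifts.append(0)
--             sheep_count += 1
--             last_sheep_position = idx
--     return list(reversed(shifts))
--
-- def sort_sheeps_min(sheep_row):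
--     result = float('inf')
--     min_operations = 0
--     shifts = get_shifts(sheep_row)
--     sheep_count = 0
--     last_sheep_position = -1
--     for idx, item in enumerate(sheep_row):
--         if item == '*':
--             if sheep_count > 0:
--                 diff = idx - last_sheep_position - 1
--                 left_shift = diff * sheep_count + min_operations
--                 result = min(result, left_shift + shifts[sheep_count])
--                 min_operations = left_shift
--             last_sheep_position = idx
--             sheep_count += 1
--     return result if result != float('inf') else 0
-- ===== SOURCE B (Python) =====
-- def sort_sheeps_min(sheep_row):
--     # positions of sheep, normalized so that gathering = making all q equal
--     q = [p - i for i, p in enumerate(i for i, c in enumerate(sheep_row) if c == '*')]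
--     if not q:
--         return 0
--     m = q[len(q) // 2]
--     return sum(abs(x - m) for x in q)
-- ===== Notes on version B (the rewrite author's own statement) =====
-- stated objective: simpler
-- what changed: Replaces A's two directional shift-cost scans (suffix cost array built right-to-left plus a left-to-right pass keeping a running minimum over all gather anchors) by the closed-form median rule: normalize the sheep positions to q_i = pos_i - i and return sum |q_i - q[len(q)//2]|.
import Mathlib
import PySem

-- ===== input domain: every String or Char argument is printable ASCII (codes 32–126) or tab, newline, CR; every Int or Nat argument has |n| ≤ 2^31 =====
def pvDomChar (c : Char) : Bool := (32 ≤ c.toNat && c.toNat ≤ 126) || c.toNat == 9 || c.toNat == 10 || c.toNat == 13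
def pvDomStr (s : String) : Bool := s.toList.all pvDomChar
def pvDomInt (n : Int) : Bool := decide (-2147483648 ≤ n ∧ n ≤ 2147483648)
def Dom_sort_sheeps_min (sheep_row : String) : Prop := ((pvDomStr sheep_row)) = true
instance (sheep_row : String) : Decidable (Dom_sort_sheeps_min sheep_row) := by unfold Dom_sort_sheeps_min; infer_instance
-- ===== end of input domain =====

-- B replaces A's two directional shift-cost scans and running minimum over gather anchors by the
-- closed-form median rule on the normalized positions q_i = pos_i - i (objective: simpler).

-- ===== PORT A =====
-- helper of A: get_shifts, scanning the row right-to-left.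
-- Python's last_sheep_position starts as None but is only read when sheep_count > 0; we initialize it to 0.
-- shifts[-1] is read only when sheep_count > 0 (shifts nonempty), so pyGetD's default 0 is never used.
def get_shifts (sheep_row : String) : List Int :=
  let st := (PySem.List.pyRange ((PySem.Str.len sheep_row) - 1) (-1) (-1)).foldl
    (fun (st : Int × Int × List Int) idx =>
      if PySem.Str.pyGet? sheep_row idx == some '*' then
        if st.1 > 0 then
          (st.1 + 1, idx, st.2.2 ++ [(st.2.1 - idx - 1) * st.1 + PySem.List.pyGetD st.2.2 (-1) 0])
        else
          (st.1 + 1, idx, st.2.2 ++ [0])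
      else st)
    (0, 0, [])
  st.2.2.reverse

-- float('inf') is modeled by none (it is only compared/min'ed, never returned: A returns 0 in that case).
-- shifts[sheep_count] is read only at sheep positions beyond the first, where it is in range: default 0 unused.
def sort_sheeps_min (sheep_row : String) : Int :=
  let shifts := get_shifts sheep_row
  let st := (PySem.List.enumerate sheep_row.toList 0).foldl
    (fun (st : Option Int × Int × Int × Int) p =>
      if p.2 == '*' then
        if st.2.2.1 > 0 then
          ((match st.1 with
            | none => some ((p.1 - st.2.2.2 - 1) * st.2.2.1 + st.2.1 + PySem.List.pyGetD shifts st.2.2.1 0)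
            | some r => some (min r ((p.1 - st.2.2.2 - 1) * st.2.2.1 + st.2.1 + PySem.List.pyGetD shifts st.2.2.1 0))),
           (p.1 - st.2.2.2 - 1) * st.2.2.1 + st.2.1, st.2.2.1 + 1, p.1)
        else (st.1, st.2.1, st.2.2.1 + 1, p.1)
      else st)
    (none, 0, 0, -1)
  match st.1 with | some r => r | none => 0

-- ===== PORT B =====
def sort_sheeps_min_alt (sheep_row : String) : Int :=
  let pos := (PySem.List.enumerate sheep_row.toList 0).foldl
    (fun acc p => if p.2 == '*' then acc ++ [p.1] else acc) []
  let q := (PySem.List.enumerate pos 0).map (fun p => p.2 - p.1)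
  if q = [] then 0
  else
    let m := q.getD (q.length / 2) 0
    (q.map (fun x => |x - m|)).sum

-- ===== PRECONDITION & SPEC =====
def Spec_sort_sheeps_min (sheep_row : String) (out : Int) : Prop := out = sort_sheeps_min_alt sheep_row
instance (sheep_row : String) (out : Int) : Decidable (Spec_sort_sheeps_min sheep_row out) := by unfold Spec_sort_sheeps_min; infer_instance

-- ===== CLAIM (what is proved, stated in full; the proofs are below) =====
def Claim_equal_sort_sheeps_min : Prop := ∀ (sheep_row : String), Dom_sort_sheeps_min sheep_row → Spec_sort_sheeps_min sheep_row (sort_sheeps_min sheep_row)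

-- ===== LEMMAS AND PROOFS =====

-- The star positions of the row, ascending: both programs depend on the row only through them.
def starPos (cs : List Char) : List Int :=
  ((PySem.List.enumerate cs 0).filter (fun p => p.2 == '*')).map (fun p => p.1)

-- sumDev l a k = Σ_i (l[i] - a - (k + i))
def sumDev : List Int → Int → Int → Int
  | [], _, _ => 0
  | x :: t, a, k => (x - a - k) + sumDev t a (k + 1)

-- cost of gathering a block to its FIRST element:  Σ_i (l[i] - l[0] - i)
def tailCost (l : List Int) : Int := sumDev l (l.headD 0) 0
-- cost of gathering a block to its LAST element:  Σ_i (last - l[i] - (len-1-i))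
def headCost (l : List Int) : Int := -(sumDev l (l.getLastD 0) (1 - (l.length : Int)))

def shiftsSpec (ps : List Int) : List Int :=
  (List.range ps.length).map (fun j => tailCost (ps.drop j))

def fval (ps : List Int) (j : Nat) : Int := headCost (ps.take (j + 1)) + tailCost (ps.drop j)

def optMin (l : List Int) : Option Int :=
  l.foldl (fun o x => match o with | none => some x | some r => some (min r x)) none

-- the loop body of get_shifts, once the non-'*' indices are skipped
def shStep (st : Int × Int × List Int) (idx : Int) : Int × Int × List Int :=
  if st.1 > 0 then
    (st.1 + 1, idx, st.2.2 ++ [(st.2.1 - idx - 1) * st.1 + PySem.List.pyGetD st.2.2 (-1) 0])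
  else
    (st.1 + 1, idx, st.2.2 ++ [0])

def shGo : List Int → Int × Int × List Int
  | [] => (0, 0, [])
  | y :: t => shStep (shGo t) y

-- the loop body of sort_sheeps_min's scan, once the non-'*' positions are skipped
def fwStep (shifts : List Int) (st : Option Int × Int × Int × Int) (i : Int) :
    Option Int × Int × Int × Int :=
  if st.2.2.1 > 0 then
    ((match st.1 with
      | none => some ((i - st.2.2.2 - 1) * st.2.2.1 + st.2.1 + PySem.List.pyGetD shifts st.2.2.1 0)
      | some r => some (min r ((i - st.2.2.2 - 1) * st.2.2.1 + st.2.1 + PySem.List.pyGetD shifts st.2.2.1 0))),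
     (i - st.2.2.2 - 1) * st.2.2.1 + st.2.1, st.2.2.1 + 1, i)
  else (st.1, st.2.1, st.2.2.1 + 1, i)

-- the loop state of sort_sheeps_min's scan after processing the (nonempty) prefix u of the stars
def FSpec (G : List Int) (u : List Int) : Option Int × Int × Int × Int :=
  (optMin ((List.range' 1 (u.length - 1)).map
      (fun j => headCost (u.take (j + 1)) + PySem.List.pyGetD G (j : Int) 0)),
   headCost u, (u.length : Int), u.getLastD 0)

theorem sumDev_shift (l : List Int) (a b k j : Int) :
    sumDev l a k = sumDev l b j + l.length * ((b + j) - (a + k)) := by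
  induction l generalizing k j with
  | nil => simp [sumDev]
  | cons x t ih =>
    simp only [sumDev, List.length_cons, ih (k + 1) (j + 1)]
    push_cast; ring

theorem sumDev_append_singleton (l : List Int) (x a k : Int) :
    sumDev (l ++ [x]) a k = sumDev l a k + (x - a - (k + l.length)) := by
  induction l generalizing k with
  | nil => simp [sumDev]
  | cons y t ih => simp only [List.cons_append, sumDev, ih (k + 1), List.length_cons]; push_cast; ring

theorem tailCost_cons (y : Int) (t : List Int) :
    tailCost (y :: t) = (t.headD 0 - y - 1) * t.length + tailCost t := by
  simp only [tailCost, List.headD_cons, sumDev]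
  rw [sumDev_shift t y (t.headD 0) (0 + 1) 0]; ring

theorem headCost_snoc (l : List Int) (x : Int) :
    headCost (l ++ [x]) = (x - l.getLastD 0 - 1) * l.length + headCost l := by
  simp only [headCost, List.getLastD_concat, List.length_append, List.length_cons, List.length_nil]
  rw [sumDev_append_singleton, sumDev_shift l x (l.getLastD 0) _ (1 - (l.length : Int))]
  push_cast; ring

theorem sumDev_eq_enum (u : List Int) (a s : Int) :
    sumDev u a s = ((PySem.List.enumerate u s).map (fun p => p.2 - a - p.1)).sum := by
  induction u generalizing s with
  | nil => simp [sumDev, PySem.List.enumerate_nil]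
  | cons x t ih => simp only [sumDev, PySem.List.enumerate_cons, List.map_cons, List.sum_cons, ih (s + 1)]

theorem headCost_singleton (x : Int) : headCost [x] = 0 := by
  simp [headCost, sumDev]

theorem tailCost_singleton (x : Int) : tailCost [x] = 0 := by
  simp [tailCost, sumDev]

-- generic: a fold whose body fires only on elements passing a test is a fold over the filtered list
theorem foldl_if_skip {α β σ : Type} (p : α → Bool) (f : α → β) (g : σ → β → σ) :
    ∀ (l : List α) (init : σ),
      l.foldl (fun st x => if p x then g st (f x) else st) init
        = ((l.filter p).map f).foldl g init := by
  intro l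
  induction l with
  | nil => intro init; rfl
  | cons x t ih =>
    intro init
    by_cases h : p x <;> simp [h, ih]

theorem foldl_if_skip_id {σ : Type} (p : Int → Bool) (g : σ → Int → σ) (l : List Int) (init : σ) :
    l.foldl (fun st x => if p x then g st x else st) init = (l.filter p).foldl g init := by
  have h := foldl_if_skip p (fun x => x) g l init
  simpa [List.map_id'] using h

theorem foldl_if_skip_fst {σ : Type} (g : σ → Int → σ) (ch : Char) (l : List (Int × Char)) (init : σ) :
    l.foldl (fun st p => if p.2 == ch then g st p.1 else st) init
      = ((l.filter (fun p => p.2 == ch)).map (fun p => p.1)).foldl g init :=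
  foldl_if_skip (fun p => p.2 == ch) (fun p => p.1) g l init

theorem foldl_shStep_reverse (ps : List Int) :
    ps.reverse.foldl shStep (0, 0, []) = shGo ps := by
  induction ps with
  | nil => rfl
  | cons y t ih => simp [List.foldl_append, ih, shGo]

theorem pyGetD_reverse_neg_one (X : List Int) (h : X ≠ []) :
    PySem.List.pyGetD X.reverse (-1) 0 = X.headD 0 := by
  have h1 : (0:Nat) < 1 := by omega
  have h2 : 1 ≤ X.reverse.length := by
    simp [List.length_reverse]
    exact List.length_pos_iff.mpr h
  have := PySem.List.pyGetD_neg_natCast X.reverse 1 0 h1 h2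
  simp only [Nat.cast_one] at this
  rw [this, List.getElem_reverse]
  cases X with
  | nil => simp at h
  | cons a t => simp

theorem shGo_spec (ps : List Int) :
    shGo ps = ((ps.length : Int), ps.headD 0,
      ((List.range ps.length).map (fun j => tailCost (ps.drop j))).reverse) := by
  induction ps with
  | nil => rfl
  | cons y t ih =>
    show shStep (shGo t) y = _
    rw [ih]
    cases t with
    | nil =>
      simp [shStep, tailCost_singleton]
    | cons z t' =>
      have hpos : (0:Int) < ((z :: t').length : Int) := by exact_mod_cast Nat.succ_pos t'.length
      have hne : (List.range (z :: t').length).map (fun j => tailCost ((z :: t').drop j)) ≠ [] := by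
        simp
      unfold shStep
      rw [if_pos hpos]
      refine Prod.ext ?_ (Prod.ext ?_ ?_)
      · simp
      · simp
      · show _ ++ _ = _
        rw [pyGetD_reverse_neg_one _ hne]
        have hhead : ((List.range (z :: t').length).map (fun j => tailCost ((z :: t').drop j))).headD 0
            = tailCost (z :: t') := by
          simp [List.range_succ_eq_map]
        rw [hhead]
        have hlast : ((z :: t').headD 0 - y - 1) * ((z :: t').length : Int) + tailCost (z :: t')
            = tailCost (y :: z :: t') := (tailCost_cons y (z :: t')).symm
        simp only [List.headD_cons] at hlast ⊢
        rw [hlast]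
        rw [show (y :: z :: t').length = (z :: t').length + 1 from rfl, List.range_succ_eq_map]
        simp [List.map_map, Function.comp, List.drop_succ_cons]

theorem filter_pyRange_star (s : String) :
    (PySem.List.pyRange 0 ((s.toList.length : Int)) 1).filter
        (fun j => PySem.Str.pyGet? s j == some '*')
      = starPos s.toList := by
  unfold starPos
  rw [PySem.List.enumerate_eq_map_pyRange s.toList '*']
  rw [List.filter_map, List.map_map]
  simp only [PySem.List.len_eq]
  rw [show ((fun (p : Int × Char) => p.1) ∘ fun j => ((j, PySem.List.pyGetD s.toList j '*') : Int × Char))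
      = fun j : Int => j from rfl, List.map_id']
  apply List.filter_congr
  intro j hj
  rw [PySem.List.mem_pyRange_one] at hj
  have hget : PySem.List.pyGet? s.toList j = s.toList[j.toNat]? := by
    obtain ⟨h0, hlt⟩ := hj
    have hsl : s.toList.length = s.length := by simp
    rw [hsl] at hlt
    simp [PySem.List.pyGet?, PySem.List.pyIdx?, h0, hlt]
  have hlt : j.toNat < s.toList.length := by omega
  simp [Function.comp, PySem.Str.pyGet?_eq, PySem.Chars.pyGet?, hget,
    PySem.List.pyGetD, List.getElem?_eq_getElem hlt]

theorem get_shifts_eq (s : String) : get_shifts s = shiftsSpec (starPos s.toList) := by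
  unfold get_shifts
  have h1 : PySem.List.pyRange ((PySem.Str.len s) - 1) (-1) (-1)
      = (PySem.List.pyRange 0 ((s.toList.length : Int)) 1).reverse := by
    rw [PySem.List.pyRange_neg_one_eq_reverse]
    norm_num [PySem.Str.len_eq]
  rw [h1]
  show ((((PySem.List.pyRange 0 ((s.toList.length : Int)) 1).reverse).foldl
      (fun st idx => if PySem.Str.pyGet? s idx == some '*' then shStep st idx else st)
      ((0:Int), (0:Int), ([] : List Int))).2.2).reverse = shiftsSpec (starPos s.toList)
  rw [foldl_if_skip_id (fun idx => PySem.Str.pyGet? s idx == some '*') shStep]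
  rw [List.filter_reverse, filter_pyRange_star, foldl_shStep_reverse, shGo_spec]
  simp [shiftsSpec]

theorem optMin_snoc (l : List Int) (x : Int) :
    optMin (l ++ [x]) = match optMin l with | none => some x | some r => some (min r x) := by
  simp [optMin, List.foldl_append]

theorem fwStep_snoc (G : List Int) (u : List Int) (hu : u ≠ []) (y : Int) :
    fwStep G (FSpec G u) y = FSpec G (u ++ [y]) := by
  have hlen : 0 < u.length := List.length_pos_iff.mpr hu
  have hlen' : (0:Int) < ((u.length : Nat) : Int) := by exact_mod_cast hlen
  unfold fwStep FSpec
  rw [if_pos hlen']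
  have hcand : (y - u.getLastD 0 - 1) * (u.length : Int) + headCost u = headCost (u ++ [y]) :=
    (headCost_snoc u y).symm
  refine Prod.ext ?_ (Prod.ext ?_ (Prod.ext ?_ ?_))
  · show _ = optMin _
    have hr : List.range' 1 ((u ++ [y]).length - 1) = List.range' 1 (u.length - 1) ++ [u.length] := by
      have h2 : (u ++ [y]).length - 1 = (u.length - 1) + 1 := by simp; omega
      rw [h2, List.range'_concat]
      congr 1
      simp; omega
    rw [hr, List.map_append]
    have hmap : (List.range' 1 (u.length - 1)).map
          (fun j => headCost ((u ++ [y]).take (j + 1)) + PySem.List.pyGetD G (j : Int) 0)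
        = (List.range' 1 (u.length - 1)).map
          (fun j => headCost (u.take (j + 1)) + PySem.List.pyGetD G (j : Int) 0) := by
      apply List.map_congr_left
      intro j hj
      rw [List.mem_range'] at hj
      obtain ⟨i, hi, rfl⟩ := hj
      rw [List.take_append_of_le_length (by omega)]
    have hnew : headCost ((u ++ [y]).take (u.length + 1)) + PySem.List.pyGetD G ((u.length : Nat) : Int) 0
        = headCost (u ++ [y]) + PySem.List.pyGetD G ((u.length : Nat) : Int) 0 := by
      rw [List.take_of_length_le (by simp)]
    simp only [List.map_cons, List.map_nil, hmap, hnew]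
    rw [optMin_snoc]
    rw [← hcand]
  · show _ = headCost (u ++ [y])
    rw [← hcand]
  · show (u.length : Int) + 1 = _
    simp
  · show y = _
    rw [List.getLastD_concat]

theorem foldl_fwStep (G : List Int) :
    ∀ (v u : List Int), u ≠ [] → v.foldl (fwStep G) (FSpec G u) = FSpec G (u ++ v) := by
  intro v
  induction v with
  | nil => intro u hu; simp
  | cons y v' ih =>
    intro u hu
    rw [List.foldl_cons, fwStep_snoc G u hu y, ih (u ++ [y]) (by simp)]
    simp

-- ordering facts about the star positions
theorem pairwise_starPos (cs : List Char) : (starPos cs).Pairwise (· < ·) := by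
  unfold starPos
  rw [List.pairwise_map]
  exact (PySem.List.pairwise_lt_enumerate cs 0).filter _

theorem getD_gap (ps : List Int) (hp : ps.Pairwise (· < ·)) (k : Nat) (hk : k + 1 < ps.length) :
    ps.getD k 0 + 1 ≤ ps.getD (k + 1) 0 := by
  have h := List.pairwise_iff_getElem.mp hp k (k + 1) (by omega) hk (by omega)
  rw [List.getD_eq_getElem ps 0 (by omega), List.getD_eq_getElem ps 0 hk]
  omega

theorem getD_mono (ps : List Int) (hp : ps.Pairwise (· < ·)) :
    ∀ i j : Nat, i ≤ j → j < ps.length → ps.getD i 0 - (i : Int) ≤ ps.getD j 0 - (j : Int) := by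
  intro i j hij
  induction j, hij using Nat.le_induction with
  | base => intro _; omega
  | succ j hij ih =>
    intro hj
    have h1 := ih (by omega)
    have h2 := getD_gap ps hp j hj
    push_cast
    push_cast at h1
    omega

-- index glue for the shifts list
theorem shiftsSpec_getD (ps : List Int) (j : Nat) (hj : j < ps.length) :
    PySem.List.pyGetD (shiftsSpec ps) ((j : Nat) : Int) 0 = tailCost (ps.drop j) := by
  rw [PySem.List.pyGetD_natCast]
  unfold shiftsSpec
  rw [List.getD_eq_getElem _ _ (by simpa using hj)]
  simp

-- take/drop glue
theorem take_succ_concat (ps : List Int) (j : Nat) (hj : j < ps.length) :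
    ps.take (j + 1) = ps.take j ++ [ps.getD j 0] := by
  rw [List.take_add_one, List.getElem?_eq_getElem hj, List.getD_eq_getElem ps 0 hj]
  simp

theorem take_getLastD (ps : List Int) (j : Nat) (hj : j < ps.length) :
    (ps.take (j + 1)).getLastD 0 = ps.getD j 0 := by
  rw [take_succ_concat ps j hj, List.getLastD_concat]

theorem drop_cons_getD (ps : List Int) (j : Nat) (hj : j < ps.length) :
    ps.drop j = ps.getD j 0 :: ps.drop (j + 1) := by
  rw [List.getD_eq_getElem ps 0 hj]
  exact List.drop_eq_getElem_cons hj

-- the discrete derivative of fval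
theorem fval_succ (ps : List Int) (j : Nat) (hj : j + 1 < ps.length) :
    fval ps (j + 1) = fval ps j
      + (ps.getD (j + 1) 0 - ps.getD j 0 - 1) * (2 * (j : Int) + 2 - ps.length) := by
  have hjl : j < ps.length := by omega
  have ht2 : ps.take (j + 1 + 1) = ps.take (j + 1) ++ [ps.getD (j + 1) 0] :=
    take_succ_concat ps (j + 1) hj
  have hdropj : ps.drop j = ps.getD j 0 :: ps.drop (j + 1) := drop_cons_getD ps j hjl
  have hdropj1 : ps.drop (j + 1) = ps.getD (j + 1) 0 :: ps.drop (j + 1 + 1) := drop_cons_getD ps (j + 1) hj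
  have hlt : (ps.take (j + 1)).length = j + 1 := by
    rw [List.length_take]; omega
  have hld : (ps.drop (j + 1)).length = ps.length - (j + 1) := by
    rw [List.length_drop]
  unfold fval
  rw [ht2, headCost_snoc, take_getLastD ps j hjl, hlt]
  conv_rhs => rw [hdropj, tailCost_cons]
  have hh : (ps.drop (j + 1)).headD 0 = ps.getD (j + 1) 0 := by rw [hdropj1]; rfl
  rw [hh, hld]
  have hc2 : ((ps.length - (j + 1) : Nat) : Int) = (ps.length : Int) - (j : Int) - 1 := by
    have : j + 1 ≤ ps.length := by omega
    push_cast [this]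
    ring
  rw [hc2]
  push_cast
  ring

theorem fval_med_le_up (ps : List Int) (hp : ps.Pairwise (· < ·)) :
    ∀ k, ps.length / 2 ≤ k → k < ps.length → fval ps (ps.length / 2) ≤ fval ps k := by
  intro k hk
  induction k, hk using Nat.le_induction with
  | base => intro _; exact le_rfl
  | succ k hk ih =>
    intro hkl
    have h1 := ih (by omega)
    rw [fval_succ ps k hkl]
    have hd : 0 ≤ ps.getD (k + 1) 0 - ps.getD k 0 - 1 := by
      have := getD_gap ps hp k hkl
      omega
    have hf : 0 ≤ 2 * (k : Int) + 2 - ps.length := by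
      have : ps.length / 2 ≤ k := hk
      omega
    nlinarith [mul_nonneg hd hf]

theorem fval_med_le_down (ps : List Int) (hp : ps.Pairwise (· < ·)) (_hm : 2 ≤ ps.length) :
    ∀ n k, k + n = ps.length / 2 → 1 ≤ k → fval ps (ps.length / 2) ≤ fval ps k := by
  intro n
  induction n with
  | zero =>
    intro k h _
    have : k = ps.length / 2 := by omega
    rw [this]
  | succ n ih =>
    intro k h hk1
    have hkm : k + 1 < ps.length := by omega
    have hstep : fval ps (k + 1) ≤ fval ps k := by
      rw [fval_succ ps k hkm]
      have hd : 0 ≤ ps.getD (k + 1) 0 - ps.getD k 0 - 1 := by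
        have := getD_gap ps hp k hkm
        omega
      have hf : 2 * (k : Int) + 2 - ps.length ≤ 0 := by
        have : k + 1 ≤ ps.length / 2 := by omega
        omega
      nlinarith [mul_nonpos_of_nonneg_of_nonpos hd hf]
    have := ih (k + 1) (by omega) (by omega)
    omega

theorem fval_med_min (ps : List Int) (hp : ps.Pairwise (· < ·)) (hm : 2 ≤ ps.length) :
    ∀ j, 1 ≤ j → j < ps.length → fval ps (ps.length / 2) ≤ fval ps j := by
  intro j hj1 hjm
  rcases le_total j (ps.length / 2) with h | h
  · exact fval_med_le_down ps hp hm (ps.length / 2 - j) j (by omega) hj1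
  · exact fval_med_le_up ps hp j h hjm

-- optMin of a list with a member that is a lower bound
theorem foldl_min_le_self : ∀ (t : List Int) (a : Int), t.foldl min a ≤ a := by
  intro t
  induction t with
  | nil => intro a; exact le_rfl
  | cons x t ih =>
    intro a
    calc (x :: t).foldl min a = t.foldl min (min a x) := rfl
    _ ≤ min a x := ih _
    _ ≤ a := min_le_left _ _

theorem foldl_min_le_of_mem : ∀ (t : List Int) (a c : Int), c ∈ t → t.foldl min a ≤ c := by
  intro t
  induction t with
  | nil => intro a c hc; simp at hc
  | cons x t ih =>
    intro a c hc
    rcases List.mem_cons.mp hc with rfl | hc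
    · calc (c :: t).foldl min a = t.foldl min (min a c) := rfl
      _ ≤ min a c := foldl_min_le_self _ _
      _ ≤ c := min_le_right _ _
    · exact ih (min a x) c hc

theorem le_foldl_min : ∀ (t : List Int) (a c : Int), c ≤ a → (∀ x ∈ t, c ≤ x) → c ≤ t.foldl min a := by
  intro t
  induction t with
  | nil => intro a c h _; exact h
  | cons x t ih =>
    intro a c ha hall
    exact ih (min a x) c (le_min ha (hall x List.mem_cons_self)) fun y hy => hall y (List.mem_cons_of_mem _ hy)

theorem optMin_foldl_some : ∀ (t : List Int) (a : Int),
    t.foldl (fun o x => match o with | none => some x | some r => some (min r x)) (some a)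
      = some (t.foldl min a) := by
  intro t
  induction t with
  | nil => intro a; rfl
  | cons x t ih => intro a; exact ih (min a x)

theorem optMin_eq_some (l : List Int) (c : Int) (hc : c ∈ l) (hlb : ∀ x ∈ l, c ≤ x) :
    optMin l = some c := by
  cases l with
  | nil => simp at hc
  | cons a t =>
    unfold optMin
    rw [List.foldl_cons]
    show t.foldl _ (some a) = _
    rw [optMin_foldl_some]
    congr 1
    apply le_antisymm
    · rcases List.mem_cons.mp hc with rfl | hc
      · exact foldl_min_le_self t c
      · exact foldl_min_le_of_mem t a c hc
    · exact le_foldl_min t a c (hlb a List.mem_cons_self) fun x hx => hlb x (List.mem_cons_of_mem _ hx)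

-- sums of absolute values with a uniform sign
theorem sum_map_abs_nonpos {α : Type} (l : List α) (f : α → Int) (h : ∀ x ∈ l, f x ≤ 0) :
    (l.map (fun x => |f x|)).sum = -((l.map f).sum) := by
  induction l with
  | nil => simp
  | cons x t ih =>
    simp only [List.map_cons, List.sum_cons]
    rw [abs_of_nonpos (h x List.mem_cons_self), ih fun y hy => h y (List.mem_cons_of_mem _ hy)]
    ring

theorem sum_map_abs_nonneg {α : Type} (l : List α) (f : α → Int) (h : ∀ x ∈ l, 0 ≤ f x) :
    (l.map (fun x => |f x|)).sum = (l.map f).sum := by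
  induction l with
  | nil => simp
  | cons x t ih =>
    simp only [List.map_cons, List.sum_cons]
    rw [abs_of_nonneg (h x List.mem_cons_self), ih fun y hy => h y (List.mem_cons_of_mem _ hy)]

-- the median sum equals fval at the median index
theorem absSum_eq_fval (ps : List Int) (hp : ps.Pairwise (· < ·)) (hm : 1 ≤ ps.length) :
    ((PySem.List.enumerate ps 0).map
        (fun p => |p.2 - p.1 - (ps.getD (ps.length / 2) 0 - ((ps.length / 2 : Nat) : Int))|)).sum
      = fval ps (ps.length / 2) := by
  set med := ps.length / 2 with hmed
  set c := ps.getD med 0 - ((med : Nat) : Int) with hc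
  have hmedlt : med < ps.length := by omega
  have hmed1 : med + 1 ≤ ps.length := by omega
  have hlu : (ps.take (med + 1)).length = med + 1 := by rw [List.length_take]; omega
  have hsplit : PySem.List.enumerate ps 0
      = PySem.List.enumerate (ps.take (med + 1)) 0
        ++ PySem.List.enumerate (ps.drop (med + 1)) (0 + ((ps.take (med + 1)).length : Int)) := by
    conv_lhs => rw [← List.take_append_drop (med + 1) ps]
    rw [PySem.List.enumerate_append]
  rw [hsplit, List.map_append, List.sum_append]
  -- left part: all deviations are ≤ 0
  have hleft : ((PySem.List.enumerate (ps.take (med + 1)) 0).map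
      (fun p => |p.2 - p.1 - c|)).sum = headCost (ps.take (med + 1)) := by
    rw [sum_map_abs_nonpos _ _ ?sign]
    case sign =>
      intro p hp'
      rw [PySem.List.mem_enumerate_iff] at hp'
      obtain ⟨k, hk, rfl⟩ := hp'
      rw [hlu] at hk
      have hkk : k < ps.length := by omega
      have hval : (ps.take (med + 1))[k] = ps.getD k 0 := by
        rw [List.getElem_take, List.getD_eq_getElem ps 0 hkk]
      rw [hval]
      have := getD_mono ps hp k med (by omega) hmedlt
      simp only [hc]
      push_cast at this
      omega
    have he : ((PySem.List.enumerate (ps.take (med + 1)) 0).map (fun p => p.2 - p.1 - c)).sum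
        = sumDev (ps.take (med + 1)) c 0 := by
      rw [sumDev_eq_enum]
      congr 1
      apply List.map_congr_left
      intro p _
      ring
    rw [he]
    unfold headCost
    rw [sumDev_shift (ps.take (med + 1)) c (( ps.take (med + 1)).getLastD 0) 0 (1 - ((ps.take (med + 1)).length : Int))]
    rw [take_getLastD ps med hmedlt, hlu]
    simp only [hc]
    push_cast
    ring
  -- right part: all deviations are ≥ 0
  have hright : ((PySem.List.enumerate (ps.drop (med + 1)) (0 + ((ps.take (med + 1)).length : Int))).map
      (fun p => |p.2 - p.1 - c|)).sum = tailCost (ps.drop med) := by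
    rw [sum_map_abs_nonneg _ _ ?sign2]
    case sign2 =>
      intro p hp'
      rw [PySem.List.mem_enumerate_iff] at hp'
      obtain ⟨k, hk, rfl⟩ := hp'
      rw [List.length_drop] at hk
      have hkk : med + 1 + k < ps.length := by omega
      have hval : (ps.drop (med + 1))[k] = ps.getD (med + 1 + k) 0 := by
        rw [List.getElem_drop, List.getD_eq_getElem ps 0 hkk]
      rw [hval, hlu]
      have := getD_mono ps hp med (med + 1 + k) (by omega) hkk
      simp only [hc]
      push_cast at this
      omega
    have he : ((PySem.List.enumerate (ps.drop (med + 1)) (0 + ((ps.take (med + 1)).length : Int))).map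
        (fun p => p.2 - p.1 - c)).sum = sumDev (ps.drop (med + 1)) c ((med : Nat) + 1) := by
      rw [sumDev_eq_enum]
      have : (0 + ((ps.take (med + 1)).length : Int)) = ((med : Nat) + 1 : Int) := by
        rw [hlu]; push_cast; ring
      rw [this]
      congr 1
      apply List.map_congr_left
      intro p _
      ring
    rw [he]
    rw [drop_cons_getD ps med hmedlt, tailCost_cons]
    have hh : tailCost (ps.drop (med + 1)) = sumDev (ps.drop (med + 1)) ((ps.drop (med + 1)).headD 0) 0 := rfl
    rw [hh]
    rw [sumDev_shift (ps.drop (med + 1)) c ((ps.drop (med + 1)).headD 0) ((med : Nat) + 1) 0]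
    by_cases hend : med + 1 < ps.length
    · have hh2 : (ps.drop (med + 1)).headD 0 = ps.getD (med + 1) 0 := by
        rw [drop_cons_getD ps (med + 1) hend]; rfl
      rw [hh2, List.length_drop]
      have hgap := getD_gap ps hp med hend
      simp only [hc]
      have hcast : ((ps.length - (med + 1) : Nat) : Int) = (ps.length : Int) - med - 1 := by
        push_cast [hmed1]
        omega
      rw [hcast]
      ring
    · have hnil : ps.drop (med + 1) = [] := by
        apply List.drop_eq_nil_of_le
        omega
      rw [hnil]
      simp [sumDev, hc]
  rw [hleft, hright]
  rfl

-- reduction of port B to starPos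
theorem alt_eq (s : String) :
    sort_sheeps_min_alt s
      = (if ((PySem.List.enumerate (starPos s.toList) 0).map (fun p => p.2 - p.1)) = [] then 0
         else (((PySem.List.enumerate (starPos s.toList) 0).map (fun p => p.2 - p.1)).map
            (fun x => |x - (((PySem.List.enumerate (starPos s.toList) 0).map (fun p => p.2 - p.1)).getD
              ((((PySem.List.enumerate (starPos s.toList) 0).map (fun p => p.2 - p.1)).length) / 2) 0)|)).sum) := by
  unfold sort_sheeps_min_alt
  rw [PySem.List.foldl_append_if (fun (p : Int × Char) => p.2 == '*') (fun p => p.1)]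
  simp only [List.nil_append]
  rfl

-- the running minimum of the forward scan is fval at the median
theorem FSpec_res (ps : List Int) (hp : ps.Pairwise (· < ·)) (hm : 2 ≤ ps.length) :
    (FSpec (shiftsSpec ps) ps).1 = some (fval ps (ps.length / 2)) := by
  unfold FSpec
  have hmap : (List.range' 1 (ps.length - 1)).map
        (fun j => headCost (ps.take (j + 1)) + PySem.List.pyGetD (shiftsSpec ps) (j : Int) 0)
      = (List.range' 1 (ps.length - 1)).map (fun j => fval ps j) := by
    apply List.map_congr_left
    intro j hj
    rw [List.mem_range'] at hj
    obtain ⟨i, hi, rfl⟩ := hj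
    rw [shiftsSpec_getD ps _ (by omega)]
    rfl
  rw [hmap]
  apply optMin_eq_some
  · apply List.mem_map.mpr
    refine ⟨ps.length / 2, ?_, rfl⟩
    rw [List.mem_range']
    exact ⟨ps.length / 2 - 1, by omega, by omega⟩
  · intro x hx
    obtain ⟨j, hj, rfl⟩ := List.mem_map.mp hx
    rw [List.mem_range'] at hj
    obtain ⟨i, hi, rfl⟩ := hj
    exact fval_med_min ps hp hm _ (by omega) (by omega)

-- port B computes fval at the median
theorem alt_val (s : String) (hm : 1 ≤ (starPos s.toList).length) :
    sort_sheeps_min_alt s = fval (starPos s.toList) ((starPos s.toList).length / 2) := by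
  rw [alt_eq]
  have hp : (starPos s.toList).Pairwise (· < ·) := pairwise_starPos s.toList
  have hlen : ((PySem.List.enumerate (starPos s.toList) 0).map (fun p => p.2 - p.1)).length
      = (starPos s.toList).length := by
    simp [PySem.List.length_enumerate]
  have hq : ((PySem.List.enumerate (starPos s.toList) 0).map (fun p => p.2 - p.1)) ≠ [] :=
    List.length_pos_iff.mp (by rw [hlen]; omega)
  rw [if_neg hq]
  have hmed : (starPos s.toList).length / 2 < (starPos s.toList).length := by omega
  have hmedlt : ((PySem.List.enumerate (starPos s.toList) 0).map (fun p => p.2 - p.1)).length / 2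
      < ((PySem.List.enumerate (starPos s.toList) 0).map (fun p => p.2 - p.1)).length := by
    rw [hlen]; exact hmed
  have hmedv : ((PySem.List.enumerate (starPos s.toList) 0).map (fun p => p.2 - p.1)).getD
        (((PySem.List.enumerate (starPos s.toList) 0).map (fun p => p.2 - p.1)).length / 2) 0
      = (starPos s.toList).getD ((starPos s.toList).length / 2) 0
        - (((starPos s.toList).length / 2 : Nat) : Int) := by
    rw [List.getD_eq_getElem _ _ hmedlt, List.getElem_map, PySem.List.getElem_enumerate,
        List.getD_eq_getElem (starPos s.toList) 0 hmed]
    simp only [hlen, zero_add]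
  rw [hmedv, List.map_map]
  have habs := absSum_eq_fval (starPos s.toList) hp hm
  rw [← habs]
  congr 1

-- the two ports agree
theorem sort_eq_alt (s : String) : sort_sheeps_min s = sort_sheeps_min_alt s := by
  have hp := pairwise_starPos s.toList
  unfold sort_sheeps_min
  rw [get_shifts_eq]
  show (match ((PySem.List.enumerate s.toList 0).foldl
      (fun st p => if p.2 == '*' then fwStep (shiftsSpec (starPos s.toList)) st p.1 else st)
      ((none, 0, 0, -1) : Option Int × Int × Int × Int)).1 with
    | some r => r | none => 0) = sort_sheeps_min_alt s
  rw [foldl_if_skip_fst (fwStep (shiftsSpec (starPos s.toList))) '*'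
      (PySem.List.enumerate s.toList 0) ((none, 0, 0, -1) : Option Int × Int × Int × Int)]
  show (match ((starPos s.toList).foldl (fwStep (shiftsSpec (starPos s.toList)))
      ((none, 0, 0, -1) : Option Int × Int × Int × Int)).1 with
    | some r => r | none => 0) = sort_sheeps_min_alt s
  by_cases h0 : starPos s.toList = []
  · rw [alt_eq, h0]
    simp [PySem.List.enumerate_nil]
  · have hm1 : 1 ≤ (starPos s.toList).length := List.length_pos_iff.mpr h0
    rw [alt_val s hm1]
    obtain ⟨p0, rest, hps⟩ : ∃ p0 rest, starPos s.toList = p0 :: rest := by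
      cases h : starPos s.toList with
      | nil => exact absurd h h0
      | cons a t => exact ⟨a, t, rfl⟩
    rw [hps] at hp
    rw [hps]
    rw [List.foldl_cons]
    have h1 : fwStep (shiftsSpec (p0 :: rest)) ((none, 0, 0, -1) : Option Int × Int × Int × Int) p0
        = FSpec (shiftsSpec (p0 :: rest)) [p0] := by
      unfold fwStep FSpec
      norm_num [headCost_singleton, optMin]
    rw [h1, foldl_fwStep (shiftsSpec (p0 :: rest)) rest [p0] (by simp)]
    cases rest with
    | nil =>
      simp [FSpec, optMin, fval, headCost_singleton, tailCost_singleton]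
    | cons z rest' =>
      have hm2 : 2 ≤ (p0 :: z :: rest').length := by simp
      rw [show ([p0] ++ z :: rest') = p0 :: z :: rest' from rfl]
      rw [FSpec_res _ hp hm2]

-- ===== VERDICT (by name: the statement is the Claim_ definition above) =====
theorem sort_sheeps_min_spec : Claim_equal_sort_sheeps_min := by
  intro s _
  unfold Spec_sort_sheeps_min
  exact sort_eq_alt s
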